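-- pv_equiv track=rewrite | github.com/eduardpeters/advent-of-code | 2023/day_3/main.py | get_gear_number
-- ===== SOURCE A (Python) =====
-- def get_gear_number(matrix, row, column):
--     c = column
--     number = 0
--     while c > 0 and matrix[row][c - 1].isdigit():
--         c -= 1
--     while c < len(matrix[row]) and matrix[row][c].isdigit():
--         number *= 10
--         number += int(matrix[row][c])
--         c += 1
--     return number
-- ===== SOURCE B (Python) =====
-- def get_gear_number(matrix, row, column):
--     line = matrix[row]
--     end = column
--     while end < len(line) and line[end].isdigit():
--         end += 1
--     value = 0
--     place = 1
--     i = end - 1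
--     while i >= 0 and line[i].isdigit():
--         value += (ord(line[i]) - 48) * place
--         place *= 10
--         i -= 1
--     return value
-- ===== Notes on version B (the rewrite author's own statement) =====
-- stated objective: alternative
-- what changed: B never scans left for the run's start and never accumulates left-to-right: it scans right from column to the run's end, then walks backwards from end-1 summing digit*place with a growing place-value accumulator (place *= 10), the run boundary falling out of the backward walk itself; A instead scans left to the start and accumulates forwards with value = value*10 + digit.
-- outside the precondition, e.g. on get_gear_number(['12'], 0, -1): A returns 212, B returns 12
import Mathlib
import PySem

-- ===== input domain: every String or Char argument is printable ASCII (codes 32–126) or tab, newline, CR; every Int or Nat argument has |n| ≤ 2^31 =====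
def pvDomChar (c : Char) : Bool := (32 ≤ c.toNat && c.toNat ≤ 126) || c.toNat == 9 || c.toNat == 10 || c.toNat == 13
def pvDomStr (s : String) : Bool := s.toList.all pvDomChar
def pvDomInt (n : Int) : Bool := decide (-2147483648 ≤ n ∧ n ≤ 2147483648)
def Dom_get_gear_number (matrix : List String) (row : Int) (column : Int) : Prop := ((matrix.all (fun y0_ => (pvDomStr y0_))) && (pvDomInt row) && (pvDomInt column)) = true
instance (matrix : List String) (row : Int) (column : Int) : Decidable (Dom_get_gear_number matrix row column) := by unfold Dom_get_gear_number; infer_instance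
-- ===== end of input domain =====

-- B scans right to the run's end and then parses BACKWARDS from end-1 with a growing
-- place-value accumulator (no left-boundary scan, no left-to-right value*10+digit walk);
-- A scans left to the start and accumulates forwards. Alternative decomposition, same cost.

-- ===== PORT A =====
-- 'matrix[row][i].isdigit()' (false where the Python indexing would raise; Pre_ keeps indices in range)
def pvDigitAt (chars : List Char) (i : Int) : Bool :=
  match PySem.List.pyGet? chars i with
  | some ch => PySem.Chars.isdigit ch
  | none => false

-- A's 'while c > 0 and matrix[row][c-1].isdigit(): c -= 1'
def pvScanL (chars : List Char) (c : Int) : Int :=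
  if h : 0 < c ∧ pvDigitAt chars (c - 1) then pvScanL chars (c - 1) else c
  termination_by c.toNat
  decreasing_by omega

-- A's 'while c < len(...) and ...isdigit(): number = number*10 + int(matrix[row][c]); c += 1'
def pvAccum (chars : List Char) (c : Int) (number : Int) : Int :=
  if h : c < chars.length ∧ pvDigitAt chars c then
    pvAccum chars (c + 1)
      (number * 10 + (PySem.Int.ofChars? [(PySem.List.pyGet? chars c).getD ' ']).getD 0)
  else number
  termination_by (chars.length - c).toNat
  decreasing_by omega

def get_gear_number (matrix : List String) (row : Int) (column : Int) : Int :=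
  let chars := (PySem.List.pyGetD matrix row "").toList
  pvAccum chars (pvScanL chars column) 0

-- ===== PORT B =====
-- Source B's 'while end < len(line) and line[end].isdigit(): end += 1'
def pvScanR (chars : List Char) (e : Int) : Int :=
  if h : e < chars.length ∧ pvDigitAt chars e then pvScanR chars (e + 1) else e
  termination_by (chars.length - e).toNat
  decreasing_by omega

-- Source B's 'while i >= 0 and line[i].isdigit(): value += (ord(line[i]) - 48) * place; place *= 10; i -= 1'
def pvAccumRtl (chars : List Char) (i : Int) (value : Int) (place : Int) : Int :=
  if h : 0 ≤ i ∧ pvDigitAt chars i then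
    pvAccumRtl chars (i - 1)
      (value + (((((PySem.List.pyGet? chars i).getD ' ').toNat : Int)) - 48) * place) (place * 10)
  else value
  termination_by (i + 1).toNat
  decreasing_by omega

def get_gear_number_alt (matrix : List String) (row : Int) (column : Int) : Int :=
  let chars := (PySem.List.pyGetD matrix row "").toList
  let stop := pvScanR chars column
  pvAccumRtl chars (stop - 1) 0 1

-- ===== PRECONDITION & SPEC =====
-- Pre_ excludes rows outside Python's index range and columns outside [-len(row), len(row)]
-- (A raises IndexError there), and negative columns whose wrapped-around character is a digit:
-- there A's value comes from reading digits via Python's negative-index wraparound, outside the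
-- puzzle's natural domain of a position within the row.
def Pre_get_gear_number (matrix : List String) (row : Int) (column : Int) : Prop :=
  PySem.Raise.InRange matrix.length row ∧
    ((0 ≤ column ∧ column ≤ ((PySem.List.pyGetD matrix row "").toList.length : Int)) ∨
     (-((PySem.List.pyGetD matrix row "").toList.length : Int) ≤ column ∧ column < 0 ∧
       pvDigitAt (PySem.List.pyGetD matrix row "").toList column = false))
instance (matrix : List String) (row : Int) (column : Int) : Decidable (Pre_get_gear_number matrix row column) := by unfold Pre_get_gear_number; infer_instance

def pvWitness_get_gear_number : List String × Int × Int := (["467..114.."], 0, 5)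

def Spec_get_gear_number (matrix : List String) (row : Int) (column : Int) (out : Int) : Prop := out = get_gear_number_alt matrix row column
instance (matrix : List String) (row : Int) (column : Int) (out : Int) : Decidable (Spec_get_gear_number matrix row column out) := by unfold Spec_get_gear_number; infer_instance

-- ===== CLAIM (what is proved, stated in full; the proofs are below) =====
def Claim_equal_get_gear_number : Prop := ∀ (matrix : List String) (row : Int) (column : Int), Dom_get_gear_number matrix row column → Pre_get_gear_number matrix row column → Spec_get_gear_number matrix row column (get_gear_number matrix row column)

-- ===== LEMMAS AND PROOFS =====

-- the common yardstick both sides are compared to: the forward parse of a char list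
def pvParse (l : List Char) : Int :=
  l.foldl (fun value ch => value * 10 + ((ch.toNat : Int) - 48)) 0

-- int(ch) on a digit character is its value
lemma pv_ofChars_digit (ch : Char) (h : PySem.Chars.isdigit ch = true) :
    PySem.Int.ofChars? [ch] = some ((ch.toNat : Int) - 48) := by
  have h0 : 48 ≤ ch.toNat ∧ ch.toNat ≤ 57 := by
    simp only [PySem.Chars.isdigit, Bool.and_eq_true, decide_eq_true_eq, Char.le_def] at h
    exact ⟨h.1, h.2⟩
  have hc : ch = Char.ofNat ch.toNat := (Char.ofNat_toNat ch).symm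
  set m := ch.toNat with hm
  obtain ⟨h1, h2⟩ := h0
  interval_cases m <;> rw [hc] <;> decide

-- the left scan stays in [0, c] and everything it walked over is a digit
lemma pv_scanL_spec (chars : List Char) (c : Int) (hc : 0 ≤ c) :
    0 ≤ pvScanL chars c ∧ pvScanL chars c ≤ c ∧
      ∀ i, pvScanL chars c ≤ i → i < c → pvDigitAt chars i = true := by
  fun_induction pvScanL chars c with
  | case1 c h ih =>
    obtain ⟨hs0, hs1, hs2⟩ := ih (by omega)
    refine ⟨hs0, by omega, fun i h1 h2 => ?_⟩
    by_cases hi : i < c - 1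
    · exact hs2 i h1 hi
    · have : i = c - 1 := by omega
      subst this; exact h.2
  | case2 c h => exact ⟨hc, le_refl _, fun i h1 h2 => by omega⟩

-- the right scan does not move left, stays ≤ len, and walks only over digits
lemma pv_scanR_spec (chars : List Char) (e : Int) (he : e ≤ (chars.length : Int)) :
    e ≤ pvScanR chars e ∧ pvScanR chars e ≤ (chars.length : Int) ∧
      ∀ i, e ≤ i → i < pvScanR chars e → pvDigitAt chars i = true := by
  fun_induction pvScanR chars e with
  | case1 e h ih =>
    obtain ⟨hs0, hs1, hs2⟩ := ih (by omega)
    refine ⟨by omega, hs1, fun i h1 h2 => ?_⟩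
    by_cases hi : e + 1 ≤ i
    · exact hs2 i hi h2
    · have : i = e := by omega
      subst this; exact h.2
  | case2 e h => exact ⟨le_refl _, he, fun i h1 h2 => by omega⟩

-- A's interleaved accumulation is the forward parse of the slice up to the right boundary
lemma pv_accum_eq (chars : List Char) (c : Int) (hc : 0 ≤ c) (number : Int) :
    pvAccum chars c number =
      (PySem.List.slice chars (some c) (some (pvScanR chars c))).foldl
        (fun value ch => value * 10 + ((ch.toNat : Int) - 48)) number := by
  fun_induction pvAccum chars c number with
  | case1 c number h ih =>
    obtain ⟨hlt, hdig⟩ := h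
    obtain ⟨ch, hch, hd⟩ : ∃ ch, PySem.List.pyGet? chars c = some ch ∧ PySem.Chars.isdigit ch = true := by
      unfold pvDigitAt at hdig
      cases hg : PySem.List.pyGet? chars c with
      | none => rw [hg] at hdig; simp at hdig
      | some ch => rw [hg] at hdig; exact ⟨ch, rfl, hdig⟩
    have hget : chars[c.toNat]? = some ch := by
      rwa [PySem.List.pyGet?_of_nonneg chars hc] at hch
    have hcn : c.toNat < chars.length := by
      by_contra hn
      rw [List.getElem?_eq_none (by omega)] at hget
      simp at hget
    have hsr : pvScanR chars c = pvScanR chars (c + 1) := by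
      rw [pvScanR]; simp [hlt, pvDigitAt, hch, hd]
    have hsr1 : c + 1 ≤ pvScanR chars (c + 1) := (pv_scanR_spec chars (c + 1) (by omega)).1
    have hslice : PySem.List.slice chars (some c) (some (pvScanR chars c)) =
        ch :: PySem.List.slice chars (some (c + 1)) (some (pvScanR chars (c + 1))) := by
      rw [hsr, PySem.List.slice_toNat chars hc (by omega), PySem.List.slice_toNat chars (by omega) (by omega)]
      have hdrop : chars.drop c.toNat = ch :: chars.drop (c + 1).toNat := by
        have h1 : (c + 1).toNat = c.toNat + 1 := by omega
        rw [h1, ← List.getElem_cons_drop (as := chars) (i := c.toNat) hcn]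
        congr 1
        have := hget
        rw [List.getElem?_eq_getElem hcn] at this
        exact (Option.some.inj this)
      rw [hdrop]
      have ht : (pvScanR chars (c + 1)).toNat - c.toNat
          = ((pvScanR chars (c + 1)).toNat - (c + 1).toNat) + 1 := by omega
      rw [ht, List.take_succ_cons]
    rw [ih (by omega), hslice, List.foldl_cons, hch]
    simp [pv_ofChars_digit ch hd]
  | case2 c number h =>
    have hsr : pvScanR chars c = c := by rw [pvScanR]; simp only [dif_neg h]
    rw [hsr, PySem.List.slice_toNat chars hc hc]
    simp

-- starting the left scan anywhere inside a digit run starting at the same place gives the same stop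
lemma pv_scanL_congr (chars : List Char) (c e : Int) (hc0 : 0 ≤ c) (hc : c ≤ e)
    (hdig : ∀ i, c ≤ i → i < e → pvDigitAt chars i = true) :
    pvScanL chars e = pvScanL chars c := by
  obtain ⟨k, hk⟩ : ∃ k : Nat, e - c = (k : Int) := ⟨(e - c).toNat, by omega⟩
  induction k generalizing e with
  | zero => have : e = c := by omega
            rw [this]
  | succ k ih =>
    have h1 : c < e := by omega
    have hstep : pvScanL chars e = pvScanL chars (e - 1) := by
      rw [pvScanL]
      have hd : pvDigitAt chars (e - 1) = true := hdig (e - 1) (by omega) (by omega)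
      have h0e : 0 < e := by omega
      simp [h0e, hd]
    rw [hstep]
    exact ih (e - 1) (by omega) (fun i hi1 hi2 => hdig i hi1 (by omega)) (by omega)

-- appending one more in-range character to a slice
lemma pv_slice_append (chars : List Char) (s i : Int) (hs : 0 ≤ s) (hsi : s ≤ i)
    (_hi : i < (chars.length : Int)) (ch : Char) (hch : chars[i.toNat]? = some ch) :
    PySem.List.slice chars (some s) (some (i + 1)) =
      PySem.List.slice chars (some s) (some i) ++ [ch] := by
  rw [PySem.List.slice_toNat chars hs (by omega), PySem.List.slice_toNat chars hs (by omega)]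
  have h1 : (i + 1).toNat - s.toNat = (i.toNat - s.toNat) + 1 := by omega
  rw [h1, List.take_add_one]
  congr 1
  rw [List.getElem?_drop]
  have h2 : s.toNat + (i.toNat - s.toNat) = i.toNat := by omega
  rw [h2, hch]
  rfl

-- B's backward place-value accumulation is the forward parse of the run ending at i+1
lemma pv_rtl (chars : List Char) (i : Int) (hi1 : -1 ≤ i) (hi2 : i < (chars.length : Int))
    (value place : Int) :
    pvAccumRtl chars i value place =
      value + place * pvParse (PySem.List.slice chars (some (pvScanL chars (i + 1))) (some (i + 1))) := by
  fun_induction pvAccumRtl chars i value place with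
  | case1 i value place h ih =>
    obtain ⟨h0, hdig⟩ := h
    obtain ⟨ch, hch, hd⟩ : ∃ ch, PySem.List.pyGet? chars i = some ch ∧ PySem.Chars.isdigit ch = true := by
      unfold pvDigitAt at hdig
      cases hg : PySem.List.pyGet? chars i with
      | none => rw [hg] at hdig; simp at hdig
      | some ch => rw [hg] at hdig; exact ⟨ch, rfl, hdig⟩
    have hget : chars[i.toNat]? = some ch := by
      rwa [PySem.List.pyGet?_of_nonneg chars h0] at hch
    have hsl : pvScanL chars (i + 1) = pvScanL chars i := by
      rw [pvScanL]
      have : (0 < i + 1 ∧ pvDigitAt chars (i + 1 - 1)) := by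
        constructor
        · omega
        · have : i + 1 - 1 = i := by omega
          rw [this]; exact hdig
      simp only [dif_pos this]
      congr 1
      omega
    have hs := pv_scanL_spec chars i h0
    have hslice : PySem.List.slice chars (some (pvScanL chars i)) (some (i + 1)) =
        PySem.List.slice chars (some (pvScanL chars i)) (some i) ++ [ch] :=
      pv_slice_append chars (pvScanL chars i) i hs.1 hs.2.1 hi2 ch hget
    have hi' : i - 1 + 1 = i := by omega
    rw [hi'] at ih
    rw [ih (by omega) (by omega), hsl, hslice]
    unfold pvParse
    rw [List.foldl_append, List.foldl_cons, List.foldl_nil, hch, Option.getD_some]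
    ring
  | case2 i value place h =>
    have hsl : pvScanL chars (i + 1) = i + 1 := by
      rw [pvScanL, dif_neg]
      rintro ⟨ha, hb⟩
      have : i + 1 - 1 = i := by omega
      rw [this] at hb
      exact h ⟨by omega, hb⟩
    have hnil : PySem.List.slice chars (some (i + 1)) (some (i + 1)) = [] :=
      List.eq_nil_of_length_eq_zero (by simp [PySem.List.length_slice])
    rw [hsl, hnil]
    unfold pvParse
    simp

-- starting the right scan anywhere inside a digit run ending at the same place gives the same stop
lemma pv_scanR_congr (chars : List Char) (s c : Int) (hs : s ≤ c)
    (hc : c ≤ (chars.length : Int))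
    (hdig : ∀ i, s ≤ i → i < c → pvDigitAt chars i = true) :
    pvScanR chars s = pvScanR chars c := by
  obtain ⟨k, hk⟩ : ∃ k : Nat, c - s = (k : Int) := ⟨(c - s).toNat, by omega⟩
  induction k generalizing s with
  | zero => have : s = c := by omega
            rw [this]
  | succ k ih =>
    have h1 : s < c := by omega
    have hstep : pvScanR chars s = pvScanR chars (s + 1) := by
      rw [pvScanR]
      have : (s < (chars.length : Int) ∧ pvDigitAt chars s) := ⟨by omega, hdig s (le_refl _) h1⟩
      simp [this]
    rw [hstep]
    exact ih (s + 1) (by omega) (fun i h1 h2 => hdig i (by omega) h2) (by omega)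

-- ===== VERDICT (by name: the statement is the Claim_ definition above) =====
theorem get_gear_number_spec : Claim_equal_get_gear_number := by
  intro matrix row column _ hpre
  obtain ⟨hrow, hcase⟩ := hpre
  unfold Spec_get_gear_number get_gear_number get_gear_number_alt
  set chars := (PySem.List.pyGetD matrix row "").toList with hchars
  rcases hcase with ⟨hcol0, hcoln⟩ | ⟨hneg0, hneg1, hnd⟩
  · -- 0 ≤ column ≤ len: both sides equal the forward parse of the run around column
    obtain ⟨hs0, hs1, hs2⟩ := pv_scanL_spec chars column hcol0
    obtain ⟨hr0, hr1, hr2⟩ := pv_scanR_spec chars column hcoln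
    have hA : pvAccum chars (pvScanL chars column) 0 =
        pvParse (PySem.List.slice chars (some (pvScanL chars column)) (some (pvScanR chars column))) := by
      rw [pv_accum_eq chars _ hs0 0,
          pv_scanR_congr chars (pvScanL chars column) column hs1 hcoln hs2]
      rfl
    have hB : pvAccumRtl chars (pvScanR chars column - 1) 0 1 =
        pvParse (PySem.List.slice chars (some (pvScanL chars column)) (some (pvScanR chars column))) := by
      have h1 : pvScanR chars column - 1 + 1 = pvScanR chars column := by omega
      rw [pv_rtl chars (pvScanR chars column - 1) (by omega) (by omega) 0 1, h1,
          pv_scanL_congr chars column (pvScanR chars column) hcol0 hr0 hr2]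
      ring
    dsimp only
    rw [hA, hB]
  · -- negative column on a non-digit: both walks stop at once
    have hsl : pvScanL chars column = column := by
      rw [pvScanL, dif_neg]; rintro ⟨h, -⟩; omega
    have hacc : pvAccum chars column 0 = 0 := by
      rw [pvAccum, dif_neg]; rintro ⟨-, hd⟩; rw [hnd] at hd; exact Bool.noConfusion hd
    have hsr : pvScanR chars column = column := by
      rw [pvScanR, dif_neg]; rintro ⟨-, hd⟩; rw [hnd] at hd; exact Bool.noConfusion hd
    have hrtl : pvAccumRtl chars (column - 1) 0 1 = 0 := by
      rw [pvAccumRtl, dif_neg]; rintro ⟨h0, -⟩; omega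
    dsimp only
    rw [hsl, hacc, hsr, hrtl]
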